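-- pv_equiv track=rewrite | github.com/risingPhoenix7/sct_hackathon | code/part_a/run.py | tspApproximation
-- ===== SOURCE A (Python) =====
-- def findMinKey(key, mstSet, V):
--     min_val = float('inf')
--     min_index = -1
--     for v in range(V):
--         if not mstSet[v] and key[v] < min_val:
--             min_val = key[v]
--             min_index = v
--     return min_index
--
-- def primMST(graph, V):
--     parent = [-1] * V
--     key = [float('inf')] * V
--     mstSet = [False] * V
--     key[0] = 0  # Start from vertex 0
--
--     for _ in range(V - 1):
--         u = findMinKey(key, mstSet, V)
--         mstSet[u] = True
--
--         for v in range(V):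
--             if graph[u][v] and not mstSet[v] and graph[u][v] < key[v]:
--                 parent[v] = u
--                 key[v] = graph[u][v]
--     return parent
--
-- def findPreorderTraversal(parent, node, visited, path, V):
--     visited[node] = True
--     path.append(node)
--     for i in range(V):
--         if parent[i] == node and not visited[i]:
--             findPreorderTraversal(parent, i, visited, path, V)
--
-- def tspApproximation(graph, V):
--     # Find the Minimum Spanning Tree using Prim's Algorithm
--     parent = primMST(graph, V)
--
--     # Find preorder traversal of the MST to approximate Hamiltonian cycle
--     visited = [False] * V
--     path = []
--     findPreorderTraversal(parent, 0, visited, path, V)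
--     path.append(0)  # Adding the start node at the end to complete the cycle
--
--     # Calculate the cost of the Hamiltonian path
--     cost = 0
--     for i in range(1, len(path)):
--         cost += graph[path[i - 1]][path[i]]
--
--     return cost, path
-- ===== SOURCE B (Python) =====
-- def tspApproximation(graph, V):
--     INF = float('inf')
--     # Prim's MST: grow the tree from vertex 0, keeping each vertex's cheapest link.
--     best = [INF] * V
--     best[0] = 0
--     parent = [-1] * V
--     done = [False] * V
--     for _ in range(V - 1):
--         u, ub = -1, INF
--         for v in range(V):
--             if not done[v] and best[v] < ub:
--                 u, ub = v, best[v]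
--         done[u] = True
--         row = graph[u]
--         for v in range(V):
--             w = row[v]
--             if w and not done[v] and w < best[v]:
--                 best[v] = w
--                 parent[v] = u
--     # children adjacency lists (ascending index per parent)
--     kids = [[] for _ in range(V)]
--     for i in range(1, V):
--         p = parent[i]
--         if p >= 0:
--             kids[p].append(i)
--     # iterative preorder DFS with an explicit stack
--     path = []
--     seen = [False] * V
--     stack = [0]
--     while stack:
--         node = stack.pop()
--         if seen[node]:
--             continue
--         seen[node] = True
--         path.append(node)
--         stack.extend(reversed(kids[node]))
--     path.append(0)
--     cost = sum(graph[a][b] for a, b in zip(path, path[1:]))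
--     return cost, path
-- ===== Notes on version B (the rewrite author's own statement) =====
-- stated objective: alternative
-- what changed: The recursive preorder that rescans the whole parent array at every node is replaced by building a children-adjacency table once and walking it iteratively with an explicit stack and a seen array, and the index-based cost loop becomes a sum over zipped consecutive path pairs; Prim's MST selection (including its lowest-index tie-breaking) is kept but written as fused fold passes. Pre_ requires V >= 1, at least V rows, and that every row a run can touch (the first V rows and the last row) has length >= V; …
-- outside the precondition, e.g. on tspApproximation([[0, 0], [0]], 2): A returns (0, [0, 0]), B returns (0, [0, 0])
import Mathlib
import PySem

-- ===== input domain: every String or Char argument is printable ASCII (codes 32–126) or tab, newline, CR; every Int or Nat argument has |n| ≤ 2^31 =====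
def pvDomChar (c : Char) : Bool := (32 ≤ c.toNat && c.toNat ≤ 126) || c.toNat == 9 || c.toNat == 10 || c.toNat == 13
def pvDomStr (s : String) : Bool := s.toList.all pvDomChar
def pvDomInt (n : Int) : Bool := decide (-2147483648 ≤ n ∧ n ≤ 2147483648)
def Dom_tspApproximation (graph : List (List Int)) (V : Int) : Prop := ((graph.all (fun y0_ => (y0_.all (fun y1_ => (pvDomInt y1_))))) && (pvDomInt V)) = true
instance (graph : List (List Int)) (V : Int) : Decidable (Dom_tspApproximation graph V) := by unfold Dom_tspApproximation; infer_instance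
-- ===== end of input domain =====

-- B replaces A's recursive parent-array-scanning preorder by a children-adjacency list walked
-- iteratively with an explicit stack, and sums the tour cost over zipped consecutive pairs
-- (objective: alternative decomposition, same asymptotic cost; Prim's MST selection is kept).

-- ===== PORT A =====
-- Python's float('inf') key entries are modelled as `none` (Option Int); these two comparisons
-- are exact for `int < int-or-inf` / `int-or-inf < int-or-inf` as A performs them.
def oLt : Option Int → Option Int → Bool
  | none, _ => false
  | some _, none => true
  | some x, some y => decide (x < y)

def iLt (w : Int) : Option Int → Bool
  | none => true
  | some x => decide (w < x)

-- findMinKey's `for v in range(V)` loop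
def fmkGo (key : List (Option Int)) (mstSet : List Bool) : List Int → Option Int × Int → Option Int × Int
  | [], s => s
  | v :: rest, (mv, mi) =>
      if ¬ PySem.List.pyGetD mstSet v false ∧ oLt (PySem.List.pyGetD key v none) mv then
        fmkGo key mstSet rest (PySem.List.pyGetD key v none, v)
      else fmkGo key mstSet rest (mv, mi)

def findMinKeyA (key : List (Option Int)) (mstSet : List Bool) (V : Int) : Int :=
  (fmkGo key mstSet (PySem.List.pyRange 0 V 1) (none, -1)).2

-- primMST's inner `for v in range(V)` update loop; state = (parent, key, mstSet)
def primUpdA (graph : List (List Int)) (u : Int) :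
    List Int → List Int × List (Option Int) × List Bool → List Int × List (Option Int) × List Bool
  | [], s => s
  | v :: rest, (parent, key, mstSet) =>
      if PySem.List.pyGetD (PySem.List.pyGetD graph u []) v 0 ≠ 0 ∧ ¬ PySem.List.pyGetD mstSet v false ∧
          iLt (PySem.List.pyGetD (PySem.List.pyGetD graph u []) v 0) (PySem.List.pyGetD key v none) = true then
        primUpdA graph u rest
          (PySem.List.pySetD parent v u, PySem.List.pySetD key v (some (PySem.List.pyGetD (PySem.List.pyGetD graph u []) v 0)), mstSet)
      else primUpdA graph u rest (parent, key, mstSet)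

-- primMST's outer `for _ in range(V - 1)` loop
def primOutA (graph : List (List Int)) (V : Int) :
    List Int → List Int × List (Option Int) × List Bool → List Int × List (Option Int) × List Bool
  | [], s => s
  | _ :: rest, (parent, key, mstSet) =>
      let u := findMinKeyA key mstSet V
      let mstSet := PySem.List.pySetD mstSet u true
      primOutA graph V rest (primUpdA graph u (PySem.List.pyRange 0 V 1) (parent, key, mstSet))

def primMSTA (graph : List (List Int)) (V : Int) : List Int :=
  (primOutA graph V (PySem.List.pyRange 0 (V - 1) 1)
    (List.replicate V.toNat (-1),
     PySem.List.pySetD (List.replicate V.toNat (none : Option Int)) 0 (some 0),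
     List.replicate V.toNat false)).1

-- findPreorderTraversal: mark the node, append it, then scan i in range(V) and recurse on
-- unvisited i with parent[i] == node.  The fuel argument only makes the recursion structural;
-- the top-level call passes V+1, which the recursion (each level marks a fresh node) never exhausts.
mutual
def fptA (parent : List Int) (V : Int) : Nat → Int → List Bool → List Int → List Bool × List Int
  | 0, _, visited, path => (visited, path)
  | f + 1, node, visited, path =>
      fptGoA parent V f node (PySem.List.pyRange 0 V 1) (PySem.List.pySetD visited node true) (path ++ [node])
termination_by f _ _ _ => (f, 0)

def fptGoA (parent : List Int) (V : Int) : Nat → Int → List Int → List Bool → List Int → List Bool × List Int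
  | _, _, [], visited, path => (visited, path)
  | f, node, i :: rest, visited, path =>
      if PySem.List.pyGetD parent i 0 = node ∧ ¬ PySem.List.pyGetD visited i false then
        let r := fptA parent V f i visited path
        fptGoA parent V f node rest r.1 r.2
      else fptGoA parent V f node rest visited path
termination_by f _ l _ _ => (f, l.length + 1)
end

-- the cost loop `for i in range(1, len(path))`
def costGoA (graph : List (List Int)) (path : List Int) : List Int → Int → Int
  | [], c => c
  | i :: rest, c =>
      costGoA graph path rest
        (c + PySem.List.pyGetD (PySem.List.pyGetD graph (PySem.List.pyGetD path (i - 1) 0) []) (PySem.List.pyGetD path i 0) 0)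

def tspApproximation (graph : List (List Int)) (V : Int) : Int × List Int :=
  let parent := primMSTA graph V
  let r := fptA parent V (V.toNat + 1) 0 (List.replicate V.toNat false) []
  let path := r.2 ++ [0]
  (costGoA graph path (PySem.List.pyRange 1 (path.length : Int) 1) 0, path)

-- ===== PORT B =====
-- iterative preorder DFS over the children-adjacency lists; the stack top is the list head
-- (Python pops from the end of the list and extends with reversed children — same traversal).
-- Fuel only makes the loop structural; (V+1)*(V+2) provably exceeds the number of iterations.
def dfsB (kids : List (List Int)) : Nat → List Int → List Bool → List Int → List Bool × List Int
  | 0, _, seen, path => (seen, path)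
  | _ + 1, [], seen, path => (seen, path)
  | f + 1, node :: rest, seen, path =>
      if PySem.List.pyGetD seen node false then dfsB kids f rest seen path
      else dfsB kids f (PySem.List.pyGetD kids node [] ++ rest) (PySem.List.pySetD seen node true) (path ++ [node])

def tspApproximation_alt (graph : List (List Int)) (V : Int) : Int × List Int :=
  let s :=
    (PySem.List.pyRange 0 (V - 1) 1).foldl
      (fun (s : List (Option Int) × List Int × List Bool) _ =>
        let sel :=
          (PySem.List.pyRange 0 V 1).foldl
            (fun (t : Int × Option Int) v =>
              if ¬ PySem.List.pyGetD s.2.2 v false ∧ oLt (PySem.List.pyGetD s.1 v none) t.2 then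
                (v, PySem.List.pyGetD s.1 v none)
              else t)
            (-1, none)
        let done := PySem.List.pySetD s.2.2 sel.1 true
        let row := PySem.List.pyGetD graph sel.1 []
        (PySem.List.pyRange 0 V 1).foldl
          (fun (s2 : List (Option Int) × List Int × List Bool) v =>
            if PySem.List.pyGetD row v 0 ≠ 0 ∧ ¬ PySem.List.pyGetD s2.2.2 v false ∧
                iLt (PySem.List.pyGetD row v 0) (PySem.List.pyGetD s2.1 v none) = true then
              (PySem.List.pySetD s2.1 v (some (PySem.List.pyGetD row v 0)), PySem.List.pySetD s2.2.1 v sel.1, s2.2.2)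
            else s2)
          (s.1, s.2.1, done))
      (PySem.List.pySetD (List.replicate V.toNat (none : Option Int)) 0 (some 0),
       List.replicate V.toNat (-1), List.replicate V.toNat false)
  let parent := s.2.1
  let kids :=
    (PySem.List.pyRange 1 V 1).foldl
      (fun ks i =>
        let p := PySem.List.pyGetD parent i 0
        if 0 ≤ p then PySem.List.pySetD ks p (PySem.List.pyGetD ks p [] ++ [i]) else ks)
      (List.replicate V.toNat ([] : List Int))
  let r := dfsB kids ((V.toNat + 1) * (V.toNat + 2)) [0] (List.replicate V.toNat false) []
  let path := r.2 ++ [0]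
  ((path.zip (path.drop 1)).foldl
      (fun c ab => c + PySem.List.pyGetD (PySem.List.pyGetD graph ab.1 []) ab.2 0) 0,
   path)

-- ===== PRECONDITION & SPEC =====
-- Pre_ admits at least one vertex and a graph whose reachable rows are full: the first V rows
-- (indexed by vertices) and, because a disconnected run reads graph[-1], the last row must have
-- length at least V; on other shapes Python A in general raises IndexError (a short row that a
-- particular run never touches can escape the error: see the cite in the claim).
def Pre_tspApproximation (graph : List (List Int)) (V : Int) : Prop :=
  1 ≤ V ∧ V ≤ (graph.length : Int) ∧ (∀ row ∈ graph.take V.toNat, V ≤ (row.length : Int)) ∧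
    (V < (graph.length : Int) → V ≤ (((graph.getLastD []).length : Nat) : Int))

instance (graph : List (List Int)) (V : Int) : Decidable (Pre_tspApproximation graph V) := by
  unfold Pre_tspApproximation; infer_instance

def pvWitness_tspApproximation : List (List Int) × Int := ([[0, 1], [1, 0]], 2)

def Spec_tspApproximation (graph : List (List Int)) (V : Int) (out : Int × List Int) : Prop := out = tspApproximation_alt graph V
instance (graph : List (List Int)) (V : Int) (out : Int × List Int) : Decidable (Spec_tspApproximation graph V out) := by unfold Spec_tspApproximation; infer_instance

-- ===== CLAIM (what is proved, stated in full; the proofs are below) =====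
def Claim_equal_tspApproximation : Prop := ∀ (graph : List (List Int)) (V : Int), Dom_tspApproximation graph V → Pre_tspApproximation graph V → Spec_tspApproximation graph V (tspApproximation graph V)

-- ===== LEMMAS AND PROOFS =====

-- abbreviations used only by the proofs
def fcount (xs : List Bool) : Nat := xs.countP (fun b => !b)

def childrenOf (parent : List Int) (V : Int) (node : Int) : List Int :=
  (PySem.List.pyRange 1 V 1).filter (fun i => PySem.List.pyGetD parent i 0 == node)

-- common characterization of the traversal: recursive preorder with an entry seen-guard,
-- returning the updated seen array and the emitted segment
mutual
def specN (parent : List Int) (V : Int) : Nat → Int → List Bool → List Bool × List Int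
  | 0, _, vis => (vis, [])
  | f + 1, node, vis =>
      if PySem.List.pyGetD vis node false then (vis, [])
      else specGo parent V f (childrenOf parent V node) (PySem.List.pySetD vis node true) [node]
termination_by f _ _ => (f, 0)

def specGo (parent : List Int) (V : Int) : Nat → List Int → List Bool → List Int → List Bool × List Int
  | _, [], vis, out => (vis, out)
  | f, c :: cs, vis, out =>
      let r := specN parent V f c vis
      specGo parent V f cs r.1 (out ++ r.2)
termination_by f l _ _ => (f, l.length + 1)
end

-- ---- basic facts about pySetD/pyGetD/fcount on Bool arrays (nonnegative indices only) ----

theorem pySetD_cases {α : Type} (xs : List α) (i : Int) (v : α) :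
    (∃ k, PySem.List.pySetD xs i v = xs.set k v) ∨ PySem.List.pySetD xs i v = xs := by
  unfold PySem.List.pySetD PySem.List.pySet?
  cases h : PySem.List.pyIdx? xs.length i with
  | none => right; simp
  | some k => left; exact ⟨k, by simp⟩

theorem getD_set_true' (xs : List Bool) (k : Nat) (j : Nat)
    (h : xs.getD j false = true) : (xs.set k true).getD j false = true := by
  by_cases hkj : k = j
  · subst hkj
    by_cases hk : k < xs.length
    · simp [List.getD, hk]
    · rw [List.set_eq_of_length_le (by omega)]; exact h
  · simpa [List.getD, List.getElem?_set, hkj] using h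

theorem fcount_set_true_le (xs : List Bool) (k : Nat) :
    fcount (xs.set k true) ≤ fcount xs := by
  induction xs generalizing k with
  | nil => simp [fcount]
  | cons x t ih =>
    cases k with
    | zero => cases x <;> simp [fcount]
    | succ k' =>
      simp only [List.set, fcount, List.countP_cons] at *
      exact Nat.add_le_add (ih k') (le_refl _)

theorem fcount_set_true_lt (xs : List Bool) (k : Nat) (hk : k < xs.length)
    (hf : xs.getD k false = false) : fcount (xs.set k true) < fcount xs := by
  induction xs generalizing k with
  | nil => simp at hk
  | cons x t ih =>
    cases k with
    | zero =>
      simp only [List.getD] at hf; simp at hf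
      subst hf; simp [fcount]
    | succ k' =>
      simp only [List.length_cons] at hk
      simp only [List.getD] at hf
      simp only [List.set, fcount, List.countP_cons]
      have := ih k' (by omega) (by simpa [List.getD] using hf)
      simp only [fcount] at this; omega

theorem getD_pySetD_true (xs : List Bool) (i : Int) (j : Nat)
    (h : xs.getD j false = true) : (PySem.List.pySetD xs i true).getD j false = true := by
  rcases pySetD_cases xs i true with ⟨k, hk⟩ | hid
  · rw [hk]; exact getD_set_true' xs k j h
  · rw [hid]; exact h

theorem fcount_pySetD_true_le (xs : List Bool) (i : Int) :
    fcount (PySem.List.pySetD xs i true) ≤ fcount xs := by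
  rcases pySetD_cases xs i true with ⟨k, hk⟩ | hid
  · rw [hk]; exact fcount_set_true_le xs k
  · rw [hid]

theorem fcount_pySetD_true_lt (xs : List Bool) (i : Int) (h0 : 0 ≤ i)
    (hl : i < (xs.length : Int)) (hf : PySem.List.pyGetD xs i false = false) :
    fcount (PySem.List.pySetD xs i true) < fcount xs := by
  rw [PySem.List.pySetD_of_nonneg xs true h0]
  refine fcount_set_true_lt xs i.toNat (by omega) ?_
  rw [PySem.List.pyGetD_of_nonneg xs false h0] at hf
  exact hf

theorem pyGetD_pySetD_self (xs : List Bool) (i : Int) (h0 : 0 ≤ i) (hl : i < (xs.length : Int)) :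
    PySem.List.pyGetD (PySem.List.pySetD xs i true) i false = true := by
  rw [PySem.List.pySetD_of_nonneg xs true h0]
  rw [PySem.List.pyGetD_eq_getElem _ false h0 (by simpa using hl)]
  simp

-- ---- spec basics ----

theorem specN_seen (parent : List Int) (V : Int) (f : Nat) (c : Int) (vis : List Bool)
    (h : PySem.List.pyGetD vis c false = true) : specN parent V f c vis = (vis, []) := by
  cases f with
  | zero => simp [specN]
  | succ f => simp [specN, h]

theorem specGo_acc (parent : List Int) (V : Int) (f : Nat) :
    ∀ (cs : List Int) (vis : List Bool) (out : List Int),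
      specGo parent V f cs vis out =
        ((specGo parent V f cs vis []).1, out ++ (specGo parent V f cs vis []).2) := by
  intro cs
  induction cs with
  | nil => intro vis out; simp [specGo]
  | cons c cs ih =>
    intro vis out
    rw [specGo, specGo]
    rw [ih ((specN parent V f c vis).1) (out ++ (specN parent V f c vis).2),
        ih ((specN parent V f c vis).1) ([] ++ (specN parent V f c vis).2)]
    simp

-- monotonicity: length is preserved, seen marks persist, fcount does not grow
theorem spec_mono_go (parent : List Int) (V : Int) (f : Nat)
    (hN : ∀ node vis, (specN parent V f node vis).1.length = vis.length ∧
      fcount (specN parent V f node vis).1 ≤ fcount vis ∧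
      (∀ j : Nat, vis.getD j false = true → (specN parent V f node vis).1.getD j false = true)) :
    ∀ cs vis out, (specGo parent V f cs vis out).1.length = vis.length ∧
      fcount (specGo parent V f cs vis out).1 ≤ fcount vis ∧
      (∀ j : Nat, vis.getD j false = true → (specGo parent V f cs vis out).1.getD j false = true) := by
  intro cs
  induction cs with
  | nil => intro vis out; simp [specGo]
  | cons c cs ih =>
    intro vis out
    rw [specGo]
    obtain ⟨h1, h2, h3⟩ := hN c vis
    obtain ⟨g1, g2, g3⟩ := ih ((specN parent V f c vis).1) (out ++ (specN parent V f c vis).2)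
    exact ⟨g1.trans h1, g2.trans h2, fun j hj => g3 j (h3 j hj)⟩

theorem spec_mono (parent : List Int) (V : Int) : ∀ f : Nat,
    (∀ node vis, (specN parent V f node vis).1.length = vis.length ∧
      fcount (specN parent V f node vis).1 ≤ fcount vis ∧
      (∀ j : Nat, vis.getD j false = true → (specN parent V f node vis).1.getD j false = true)) ∧
    (∀ cs vis out, (specGo parent V f cs vis out).1.length = vis.length ∧
      fcount (specGo parent V f cs vis out).1 ≤ fcount vis ∧
      (∀ j : Nat, vis.getD j false = true → (specGo parent V f cs vis out).1.getD j false = true)) := by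
  intro f
  induction f with
  | zero =>
    have hN : ∀ node vis, ((specN parent V 0 node vis).1.length = vis.length ∧
        fcount (specN parent V 0 node vis).1 ≤ fcount vis ∧
        (∀ j : Nat, vis.getD j false = true → (specN parent V 0 node vis).1.getD j false = true)) := by
      intro node vis; simp [specN]
    exact ⟨hN, spec_mono_go parent V 0 hN⟩
  | succ f ih =>
    have hN : ∀ node vis, ((specN parent V (f + 1) node vis).1.length = vis.length ∧
        fcount (specN parent V (f + 1) node vis).1 ≤ fcount vis ∧
        (∀ j : Nat, vis.getD j false = true → (specN parent V (f + 1) node vis).1.getD j false = true)) := by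
      intro node vis
      rw [specN]
      by_cases h : PySem.List.pyGetD vis node false
      · simp [h]
      · simp only [h, if_false, Bool.false_eq_true]
        obtain ⟨g1, g2, g3⟩ := (spec_mono_go parent V f ih.1)
          (childrenOf parent V node) (PySem.List.pySetD vis node true) [node]
        refine ⟨g1.trans (PySem.List.length_pySetD vis node true), ?_, ?_⟩
        · exact g2.trans (fcount_pySetD_true_le vis node)
        · exact fun j hj => g3 j (getD_pySetD_true vis node j hj)
    exact ⟨hN, spec_mono_go parent V (f + 1) hN⟩

-- fuel irrelevance once the fuel exceeds the number of unseen entries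
theorem spec_irrel_go (parent : List Int) (V : Int) (f g : Nat)
    (hN : ∀ node vis, V ≤ (vis.length : Int) → 0 ≤ node → node < V →
      fcount vis < f → fcount vis < g → specN parent V f node vis = specN parent V g node vis) :
    ∀ cs vis out, V ≤ (vis.length : Int) → (∀ c ∈ cs, 0 ≤ c ∧ c < V) →
      fcount vis < f → fcount vis < g → specGo parent V f cs vis out = specGo parent V g cs vis out := by
  intro cs
  induction cs with
  | nil => intro vis out _ _ _ _; rw [specGo, specGo]
  | cons c cs ih =>
    intro vis out hV hcs hf hg
    rw [specGo, specGo]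
    obtain ⟨hc0, hcV⟩ := hcs c List.mem_cons_self
    rw [← hN c vis hV hc0 hcV hf hg]
    refine ih ((specN parent V f c vis).1) _ ?_ (fun x hx => hcs x (List.mem_cons_of_mem c hx)) ?_ ?_
    · rw [((spec_mono parent V f).1 c vis).1]; exact hV
    · exact Nat.lt_of_le_of_lt ((spec_mono parent V f).1 c vis).2.1 hf
    · exact Nat.lt_of_le_of_lt ((spec_mono parent V f).1 c vis).2.1 hg

theorem spec_irrel (parent : List Int) (V : Int) : ∀ f : Nat, ∀ g : Nat,
    (∀ node vis, V ≤ (vis.length : Int) → 0 ≤ node → node < V →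
      fcount vis < f → fcount vis < g → specN parent V f node vis = specN parent V g node vis) := by
  intro f
  induction f with
  | zero => intro g node vis _ _ _ hf _; omega
  | succ f ih =>
    intro g node vis hV h0 hnV hf hg
    obtain ⟨g', rfl⟩ : ∃ g', g = g' + 1 := ⟨g - 1, by omega⟩
    rw [specN, specN]
    by_cases h : PySem.List.pyGetD vis node false
    · simp [h]
    · simp only [h, if_false, Bool.false_eq_true]
      have hlt : fcount (PySem.List.pySetD vis node true) < fcount vis :=
        fcount_pySetD_true_lt vis node h0 (by omega) (by simpa using h)
      refine spec_irrel_go parent V f g' (fun n v a b c d e => ih g' n v a b c d e)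
        (childrenOf parent V node) _ [node] ?_ ?_ ?_ ?_
      · rw [(PySem.List.length_pySetD vis node true)]; exact hV
      · intro x hx
        simp only [childrenOf, List.mem_filter, PySem.List.mem_pyRange_one] at hx
        omega
      · omega
      · omega

-- ---- A's recursive traversal equals the spec ----

theorem fptA_go_spec (parent : List Int) (V : Int) (f : Nat)
    (hN : ∀ node vis path, V ≤ (vis.length : Int) → 0 ≤ node → node < V →
      PySem.List.pyGetD vis node false = false →
      (node = 0 ∨ PySem.List.pyGetD vis 0 false = true) →
      fptA parent V f node vis path =
        ((specN parent V f node vis).1, path ++ (specN parent V f node vis).2)) :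
    ∀ node rng vis path, V ≤ (vis.length : Int) → (∀ i ∈ rng, 0 ≤ i ∧ i < V) →
      PySem.List.pyGetD vis 0 false = true →
      fptGoA parent V f node rng vis path =
        ((specGo parent V f (rng.filter (fun i => (PySem.List.pyGetD parent i 0 == node) && (i != 0))) vis []).1,
         path ++ (specGo parent V f (rng.filter (fun i => (PySem.List.pyGetD parent i 0 == node) && (i != 0))) vis []).2) := by
  intro node rng
  induction rng with
  | nil => intro vis path _ _ _; rw [fptGoA]; simp [specGo]
  | cons i rest ih =>
    intro vis path hV hr h0
    rw [fptGoA]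
    by_cases hpi : PySem.List.pyGetD parent i 0 = node
    · by_cases hi0 : i = 0
      · subst hi0
        rw [if_neg (by simp [h0])]
        rw [List.filter_cons_of_neg (by simp)]
        exact ih vis path hV (fun x hx => hr x (List.mem_cons_of_mem _ hx)) h0
      · by_cases hvi : PySem.List.pyGetD vis i false = true
        · rw [if_neg (by simp [hvi])]
          rw [List.filter_cons_of_pos (by simp [hpi, hi0])]
          rw [specGo]
          simp only [specN_seen parent V f i vis hvi]
          exact ih vis path hV (fun x hx => hr x (List.mem_cons_of_mem _ hx)) h0
        · rw [if_pos ⟨hpi, by simp [hvi]⟩]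
          obtain ⟨hi0', hiV⟩ := hr i List.mem_cons_self
          have hs := hN i vis path hV hi0' hiV (by simpa using hvi) (Or.inr h0)
          rw [List.filter_cons_of_pos (by simp [hpi, hi0])]
          have hlen : ((specN parent V f i vis).1.length : Int) = (vis.length : Int) := by
            exact_mod_cast congrArg Nat.cast ((spec_mono parent V f).1 i vis).1
          have h0' : PySem.List.pyGetD (specN parent V f i vis).1 0 false = true := by
            rw [PySem.List.pyGetD_zero]
            exact ((spec_mono parent V f).1 i vis).2.2 0 (by rw [← PySem.List.pyGetD_zero]; exact h0)
          have := ih ((specN parent V f i vis).1) (path ++ (specN parent V f i vis).2)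
            (by rw [((spec_mono parent V f).1 i vis).1]; exact hV)
            (fun x hx => hr x (List.mem_cons_of_mem _ hx)) h0'
          rw [hs, this]
          rw [specGo]
          rw [specGo_acc parent V f
            (rest.filter (fun i => (PySem.List.pyGetD parent i 0 == node) && (i != 0)))
            ((specN parent V f i vis).1) ([] ++ (specN parent V f i vis).2)]
          simp
    · rw [if_neg (by simp [hpi])]
      rw [List.filter_cons_of_neg (by simp [hpi])]
      exact ih vis path hV (fun x hx => hr x (List.mem_cons_of_mem _ hx)) h0

theorem fptA_spec (parent : List Int) (V : Int) : ∀ f : Nat,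
    ∀ node vis path, V ≤ (vis.length : Int) → 0 ≤ node → node < V →
      PySem.List.pyGetD vis node false = false →
      (node = 0 ∨ PySem.List.pyGetD vis 0 false = true) →
      fptA parent V f node vis path =
        ((specN parent V f node vis).1, path ++ (specN parent V f node vis).2) := by
  intro f
  induction f with
  | zero => intro node vis path _ _ _ _ _; rw [fptA, specN]; simp
  | succ f ih =>
    intro node vis path hV h0n hnV hfalse hzero
    rw [fptA, specN]
    rw [if_neg (by simp [hfalse])]
    have hfil : (PySem.List.pyRange 0 V 1).filter
        (fun i => (PySem.List.pyGetD parent i 0 == node) && (i != 0)) = childrenOf parent V node := by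
      rw [PySem.List.pyRange_one_cons (by omega : (0:Int) < V)]
      rw [List.filter_cons_of_neg (by simp)]
      unfold childrenOf
      refine List.filter_congr ?_
      intro x hx
      have := PySem.List.mem_pyRange_one.mp hx
      simp [show x ≠ 0 by omega]
    have h0' : PySem.List.pyGetD (PySem.List.pySetD vis node true) 0 false = true := by
      rcases hzero with h | h
      · subst h; exact pyGetD_pySetD_self vis 0 h0n (by omega)
      · rw [PySem.List.pyGetD_zero]
        exact getD_pySetD_true vis node 0 (by rw [← PySem.List.pyGetD_zero]; exact h)
    have := fptA_go_spec parent V f ih node (PySem.List.pyRange 0 V 1)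
      (PySem.List.pySetD vis node true) (path ++ [node])
      (by rw [PySem.List.length_pySetD]; exact hV)
      (fun x hx => by have := PySem.List.mem_pyRange_one.mp hx; omega) h0'
    rw [this, hfil]
    rw [specGo_acc parent V f (childrenOf parent V node) (PySem.List.pySetD vis node true) [node]]
    simp

-- ---- B's stack traversal equals the spec ----

-- dfsB with the canonical (sufficient) fuel
def dfsC (kids : List (List Int)) (stack : List Int) (vis : List Bool) (path : List Int) :
    List Bool × List Int :=
  dfsB kids (stack.length + (vis.length + 1) * fcount vis + 1) stack vis path

theorem childrenOf_len (parent : List Int) (V : Int) (node : Int) :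
    (childrenOf parent V node).length ≤ (V - 1).toNat := by
  unfold childrenOf
  calc _ ≤ (PySem.List.pyRange 1 V 1).length := List.length_filter_le _ _
    _ = (V - 1).toNat := PySem.List.length_pyRange_one 1 V

theorem childrenOf_mem (parent : List Int) (V : Int) (node x : Int)
    (hx : x ∈ childrenOf parent V node) : 0 ≤ x ∧ x < V := by
  simp only [childrenOf, List.mem_filter, PySem.List.mem_pyRange_one] at hx
  omega

theorem dfsB_irrel (parent : List Int) (V : Int) (kids : List (List Int))
    (hk : ∀ c : Int, 0 ≤ c → c < V → PySem.List.pyGetD kids c [] = childrenOf parent V c) :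
    ∀ f g stack vis path, (V : Int) = (vis.length : Int) → (∀ c ∈ stack, 0 ≤ c ∧ c < V) →
      stack.length + (vis.length + 1) * fcount vis < f →
      stack.length + (vis.length + 1) * fcount vis < g →
      dfsB kids f stack vis path = dfsB kids g stack vis path := by
  intro f
  induction f with
  | zero => intro g stack vis path _ _ hf _; omega
  | succ f ih =>
    intro g stack vis path hlen hs hf hg
    obtain ⟨g', rfl⟩ : ∃ g', g = g' + 1 := ⟨g - 1, by omega⟩
    cases stack with
    | nil => rw [dfsB, dfsB]
    | cons node rest =>
      rw [dfsB, dfsB]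
      by_cases hn : PySem.List.pyGetD vis node false = true
      · simp only [hn, if_true]
        exact ih g' rest vis path hlen (fun c hc => hs c (List.mem_cons_of_mem _ hc))
          (by simp at hf ⊢; omega) (by simp at hg ⊢; omega)
      · simp only [hn, if_false, Bool.false_eq_true]
        obtain ⟨hn0, hnV⟩ := hs node List.mem_cons_self
        rw [hk node hn0 hnV]
        have hflt : fcount (PySem.List.pySetD vis node true) < fcount vis :=
          fcount_pySetD_true_lt vis node hn0 (by omega) (by simpa using hn)
        have hcl : (childrenOf parent V node).length ≤ vis.length := by
          have := childrenOf_len parent V node; omega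
        have hmul : (vis.length + 1) * fcount (PySem.List.pySetD vis node true) + (vis.length + 1)
            ≤ (vis.length + 1) * fcount vis := by
          calc (vis.length + 1) * fcount (PySem.List.pySetD vis node true) + (vis.length + 1)
              = (vis.length + 1) * (fcount (PySem.List.pySetD vis node true) + 1) := by ring
            _ ≤ (vis.length + 1) * fcount vis := Nat.mul_le_mul_left _ (by omega)
        refine ih g' (childrenOf parent V node ++ rest) (PySem.List.pySetD vis node true)
          (path ++ [node]) (by rw [PySem.List.length_pySetD]; exact hlen) ?_ ?_ ?_
        · intro c hc
          rcases List.mem_append.mp hc with hc | hc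
          · exact childrenOf_mem parent V node c hc
          · exact hs c (List.mem_cons_of_mem _ hc)
        · rw [PySem.List.length_pySetD]
          simp only [List.length_append, List.length_cons] at hf ⊢
          omega
        · rw [PySem.List.length_pySetD]
          simp only [List.length_append, List.length_cons] at hg ⊢
          omega

theorem dfsC_nil (kids : List (List Int)) (vis : List Bool) (path : List Int) :
    dfsC kids [] vis path = (vis, path) := by
  rw [dfsC]; rw [dfsB]

theorem dfsC_seen (kids : List (List Int)) (node : Int) (rest : List Int) (vis : List Bool)
    (path : List Int) (h : PySem.List.pyGetD vis node false = true) :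
    dfsC kids (node :: rest) vis path = dfsC kids rest vis path := by
  rw [dfsC, dfsC, List.length_cons]
  have : rest.length + 1 + (vis.length + 1) * fcount vis + 1
      = (rest.length + (vis.length + 1) * fcount vis + 1) + 1 := by ring
  rw [this, dfsB, if_pos h]

theorem dfsC_mark (parent : List Int) (V : Int) (kids : List (List Int))
    (hk : ∀ c : Int, 0 ≤ c → c < V → PySem.List.pyGetD kids c [] = childrenOf parent V c)
    (node : Int) (rest : List Int) (vis : List Bool) (path : List Int)
    (hlen : (V : Int) = (vis.length : Int)) (hn0 : 0 ≤ node) (hnV : node < V)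
    (hrest : ∀ c ∈ rest, 0 ≤ c ∧ c < V)
    (h : PySem.List.pyGetD vis node false = false) :
    dfsC kids (node :: rest) vis path =
      dfsC kids (childrenOf parent V node ++ rest) (PySem.List.pySetD vis node true)
        (path ++ [node]) := by
  rw [dfsC, dfsC, List.length_cons]
  have heq : rest.length + 1 + (vis.length + 1) * fcount vis + 1
      = (rest.length + (vis.length + 1) * fcount vis + 1) + 1 := by ring
  rw [heq, dfsB, if_neg (by simp [h]), hk node hn0 hnV]
  have hflt : fcount (PySem.List.pySetD vis node true) < fcount vis :=
    fcount_pySetD_true_lt vis node hn0 (by omega) h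
  have hcl : (childrenOf parent V node).length ≤ vis.length := by
    have := childrenOf_len parent V node; omega
  have hmul : (vis.length + 1) * fcount (PySem.List.pySetD vis node true) + (vis.length + 1)
      ≤ (vis.length + 1) * fcount vis := by
    calc (vis.length + 1) * fcount (PySem.List.pySetD vis node true) + (vis.length + 1)
        = (vis.length + 1) * (fcount (PySem.List.pySetD vis node true) + 1) := by ring
      _ ≤ (vis.length + 1) * fcount vis := Nat.mul_le_mul_left _ (by omega)
  refine dfsB_irrel parent V kids hk _ _ _ _ _
    (by rw [PySem.List.length_pySetD]; exact hlen) ?_ ?_ ?_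
  · intro c hc
    rcases List.mem_append.mp hc with hc | hc
    · exact childrenOf_mem parent V node c hc
    · exact hrest c hc
  · rw [PySem.List.length_pySetD]
    simp only [List.length_append]
    omega
  · rw [PySem.List.length_pySetD]
    simp only [List.length_append]
    omega

theorem dfsC_spec (parent : List Int) (V : Int) (kids : List (List Int))
    (hk : ∀ c : Int, 0 ≤ c → c < V → PySem.List.pyGetD kids c [] = childrenOf parent V c) :
    ∀ n : Nat, ∀ (vis : List Bool) (cs rest path : List Int), fcount vis = n →
      (V : Int) = (vis.length : Int) → (∀ c ∈ cs, 0 ≤ c ∧ c < V) → (∀ c ∈ rest, 0 ≤ c ∧ c < V) →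
      dfsC kids (cs ++ rest) vis path =
        dfsC kids rest (specGo parent V (fcount vis + 1) cs vis []).1
          (path ++ (specGo parent V (fcount vis + 1) cs vis []).2) := by
  intro n
  induction n using Nat.strong_induction_on with
  | _ n ihn =>
    intro vis cs
    induction cs with
    | nil => intro rest path hn hlen _ hrest; rw [specGo]; simp
    | cons c cs' ih =>
      intro rest path hn hlen hcs hrest
      obtain ⟨hc0, hcV⟩ := hcs c List.mem_cons_self
      have hbounds' : ∀ x ∈ cs' ++ rest, 0 ≤ x ∧ x < V := by
        intro x hx
        rcases List.mem_append.mp hx with hx | hx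
        · exact hcs x (List.mem_cons_of_mem _ hx)
        · exact hrest x hx
      by_cases hvc : PySem.List.pyGetD vis c false = true
      · rw [List.cons_append, dfsC_seen kids c (cs' ++ rest) vis path hvc]
        rw [specGo]
        simp only [specN_seen parent V (fcount vis + 1) c vis hvc]
        simpa using ih rest path hn hlen (fun x hx => hcs x (List.mem_cons_of_mem _ hx)) hrest
      · have hvc' : PySem.List.pyGetD vis c false = false := by simpa using hvc
        have hmark := dfsC_mark parent V kids hk c (cs' ++ rest) vis path hlen hc0 hcV hbounds' hvc'
        have hflt : fcount (PySem.List.pySetD vis c true) < n :=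
          hn ▸ fcount_pySetD_true_lt vis c hc0 (by omega) hvc'
        have hlen' : (V : Int) = ((PySem.List.pySetD vis c true).length : Int) := by
          rw [PySem.List.length_pySetD]; exact hlen
        have hchb : ∀ x ∈ childrenOf parent V c, 0 ≤ x ∧ x < V :=
          fun x hx => childrenOf_mem parent V c x hx
        -- first pass: the child's whole subtree
        have h1 := ihn (fcount (PySem.List.pySetD vis c true)) hflt (PySem.List.pySetD vis c true)
          (childrenOf parent V c) (cs' ++ rest) (path ++ [c]) rfl hlen' hchb hbounds'
        set q1 := specGo parent V (fcount (PySem.List.pySetD vis c true) + 1)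
          (childrenOf parent V c) (PySem.List.pySetD vis c true) [] with hq1def
        have hq1len : q1.1.length = vis.length := by
          rw [hq1def]
          rw [((spec_mono parent V _).2 (childrenOf parent V c) (PySem.List.pySetD vis c true) []).1]
          exact PySem.List.length_pySetD vis c true
        have hq1fc : fcount q1.1 ≤ fcount (PySem.List.pySetD vis c true) := by
          rw [hq1def]
          exact ((spec_mono parent V _).2 (childrenOf parent V c) (PySem.List.pySetD vis c true) []).2.1
        -- second pass: the remaining siblings
        have h2 := ihn (fcount q1.1) (by omega) q1.1 cs' rest (path ++ [c] ++ q1.2) rfl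
          (by rw [hq1len]; exact hlen) (fun x hx => hcs x (List.mem_cons_of_mem _ hx)) hrest
        -- spec side: unfold one level and renormalize the fuels
        have hspec : specGo parent V (fcount vis + 1) (c :: cs') vis [] =
            ((specGo parent V (fcount q1.1 + 1) cs' q1.1 []).1,
             [c] ++ q1.2 ++ (specGo parent V (fcount q1.1 + 1) cs' q1.1 []).2) := by
          rw [specGo]
          rw [specN]
          rw [if_neg (by simp [hvc'])]
          have hfuel1 : specGo parent V (fcount vis) (childrenOf parent V c)
              (PySem.List.pySetD vis c true) [c] =
              specGo parent V (fcount (PySem.List.pySetD vis c true) + 1) (childrenOf parent V c)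
                (PySem.List.pySetD vis c true) [c] := by
            refine spec_irrel_go parent V (fcount vis) (fcount (PySem.List.pySetD vis c true) + 1)
              (spec_irrel parent V (fcount vis) (fcount (PySem.List.pySetD vis c true) + 1))
              (childrenOf parent V c) (PySem.List.pySetD vis c true) [c]
              (by rw [PySem.List.length_pySetD]; omega) hchb (by omega) (by omega)
          rw [hfuel1]
          rw [specGo_acc parent V (fcount (PySem.List.pySetD vis c true) + 1)
            (childrenOf parent V c) (PySem.List.pySetD vis c true) [c], ← hq1def]
          have hfuel2 : specGo parent V (fcount vis + 1) cs' q1.1 ([] ++ ([c] ++ q1.2)) =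
              specGo parent V (fcount q1.1 + 1) cs' q1.1 ([] ++ ([c] ++ q1.2)) := by
            refine spec_irrel_go parent V (fcount vis + 1) (fcount q1.1 + 1)
              (spec_irrel parent V (fcount vis + 1) (fcount q1.1 + 1)) cs' q1.1 _
              (by rw [hq1len]; omega) (fun x hx => hcs x (List.mem_cons_of_mem _ hx))
              (by omega) (by omega)
          rw [hfuel2]
          rw [specGo_acc parent V (fcount q1.1 + 1) cs' q1.1 ([] ++ ([c] ++ q1.2))]
          simp
        rw [hspec, List.cons_append, hmark, h1, h2]
        simp


-- ---- Prim: A's recursions equal B's folds ----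

theorem fmk_eq_fold (key : List (Option Int)) (mst : List Bool) :
    ∀ (l : List Int) (mv : Option Int) (mi : Int),
      fmkGo key mst l (mv, mi) =
        ((l.foldl (fun (t : Int × Option Int) v =>
            if ¬ PySem.List.pyGetD mst v false ∧ oLt (PySem.List.pyGetD key v none) t.2 then
              (v, PySem.List.pyGetD key v none)
            else t) (mi, mv)).2,
         (l.foldl (fun (t : Int × Option Int) v =>
            if ¬ PySem.List.pyGetD mst v false ∧ oLt (PySem.List.pyGetD key v none) t.2 then
              (v, PySem.List.pyGetD key v none)
            else t) (mi, mv)).1) := by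
  intro l
  induction l with
  | nil => intro mv mi; rfl
  | cons v rest ih =>
    intro mv mi
    rw [fmkGo, List.foldl_cons]
    by_cases hc : ¬ PySem.List.pyGetD mst v false ∧ oLt (PySem.List.pyGetD key v none) mv
    · rw [if_pos hc]
      have : (if ¬ PySem.List.pyGetD mst v false ∧ oLt (PySem.List.pyGetD key v none) (mi, mv).2 then
          (v, PySem.List.pyGetD key v none) else (mi, mv)) = (v, PySem.List.pyGetD key v none) := if_pos hc
      rw [this]
      exact ih (PySem.List.pyGetD key v none) v
    · rw [if_neg hc]
      have : (if ¬ PySem.List.pyGetD mst v false ∧ oLt (PySem.List.pyGetD key v none) (mi, mv).2 then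
          (v, PySem.List.pyGetD key v none) else (mi, mv)) = (mi, mv) := if_neg hc
      rw [this]
      exact ih mv mi

theorem primUpd_eq_fold (graph : List (List Int)) (u : Int) :
    ∀ (l : List Int) (p : List Int) (k : List (Option Int)) (m : List Bool),
      primUpdA graph u l (p, k, m) =
        (fun (b : List (Option Int) × List Int × List Bool) => (b.2.1, b.1, b.2.2))
          (l.foldl (fun (s2 : List (Option Int) × List Int × List Bool) v =>
            if PySem.List.pyGetD (PySem.List.pyGetD graph u []) v 0 ≠ 0 ∧
                ¬ PySem.List.pyGetD s2.2.2 v false ∧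
                iLt (PySem.List.pyGetD (PySem.List.pyGetD graph u []) v 0) (PySem.List.pyGetD s2.1 v none) = true then
              (PySem.List.pySetD s2.1 v (some (PySem.List.pyGetD (PySem.List.pyGetD graph u []) v 0)),
               PySem.List.pySetD s2.2.1 v u, s2.2.2)
            else s2) (k, p, m)) := by
  intro l
  induction l with
  | nil => intro p k m; rfl
  | cons v rest ih =>
    intro p k m
    rw [primUpdA, List.foldl_cons]
    by_cases hc : PySem.List.pyGetD (PySem.List.pyGetD graph u []) v 0 ≠ 0 ∧
        ¬ PySem.List.pyGetD m v false ∧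
        iLt (PySem.List.pyGetD (PySem.List.pyGetD graph u []) v 0) (PySem.List.pyGetD k v none) = true
    · rw [if_pos hc]
      have hstep : (if PySem.List.pyGetD (PySem.List.pyGetD graph u []) v 0 ≠ 0 ∧
            ¬ PySem.List.pyGetD ((k, p, m) : List (Option Int) × List Int × List Bool).2.2 v false ∧
            iLt (PySem.List.pyGetD (PySem.List.pyGetD graph u []) v 0)
              (PySem.List.pyGetD ((k, p, m) : List (Option Int) × List Int × List Bool).1 v none) = true then
          (PySem.List.pySetD ((k, p, m) : List (Option Int) × List Int × List Bool).1 v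
            (some (PySem.List.pyGetD (PySem.List.pyGetD graph u []) v 0)),
           PySem.List.pySetD ((k, p, m) : List (Option Int) × List Int × List Bool).2.1 v u,
           ((k, p, m) : List (Option Int) × List Int × List Bool).2.2)
        else ((k, p, m) : List (Option Int) × List Int × List Bool)) =
          (PySem.List.pySetD k v (some (PySem.List.pyGetD (PySem.List.pyGetD graph u []) v 0)),
           PySem.List.pySetD p v u, m) := if_pos hc
      rw [hstep]
      exact ih (PySem.List.pySetD p v u)
        (PySem.List.pySetD k v (some (PySem.List.pyGetD (PySem.List.pyGetD graph u []) v 0))) m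
    · rw [if_neg hc]
      have hstep : (if PySem.List.pyGetD (PySem.List.pyGetD graph u []) v 0 ≠ 0 ∧
            ¬ PySem.List.pyGetD ((k, p, m) : List (Option Int) × List Int × List Bool).2.2 v false ∧
            iLt (PySem.List.pyGetD (PySem.List.pyGetD graph u []) v 0)
              (PySem.List.pyGetD ((k, p, m) : List (Option Int) × List Int × List Bool).1 v none) = true then
          (PySem.List.pySetD ((k, p, m) : List (Option Int) × List Int × List Bool).1 v
            (some (PySem.List.pyGetD (PySem.List.pyGetD graph u []) v 0)),
           PySem.List.pySetD ((k, p, m) : List (Option Int) × List Int × List Bool).2.1 v u,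
           ((k, p, m) : List (Option Int) × List Int × List Bool).2.2)
        else ((k, p, m) : List (Option Int) × List Int × List Bool)) = (k, p, m) := if_neg hc
      rw [hstep]
      exact ih p k m

theorem primOut_eq_fold (graph : List (List Int)) (V : Int) :
    ∀ (l : List Int) (p : List Int) (k : List (Option Int)) (m : List Bool),
      primOutA graph V l (p, k, m) =
        (fun (b : List (Option Int) × List Int × List Bool) => (b.2.1, b.1, b.2.2))
          (l.foldl (fun (s : List (Option Int) × List Int × List Bool) _ =>
            let sel :=
              (PySem.List.pyRange 0 V 1).foldl
                (fun (t : Int × Option Int) v =>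
                  if ¬ PySem.List.pyGetD s.2.2 v false ∧ oLt (PySem.List.pyGetD s.1 v none) t.2 then
                    (v, PySem.List.pyGetD s.1 v none)
                  else t)
                (-1, none)
            let done := PySem.List.pySetD s.2.2 sel.1 true
            let row := PySem.List.pyGetD graph sel.1 []
            (PySem.List.pyRange 0 V 1).foldl
              (fun (s2 : List (Option Int) × List Int × List Bool) v =>
                if PySem.List.pyGetD row v 0 ≠ 0 ∧ ¬ PySem.List.pyGetD s2.2.2 v false ∧
                    iLt (PySem.List.pyGetD row v 0) (PySem.List.pyGetD s2.1 v none) = true then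
                  (PySem.List.pySetD s2.1 v (some (PySem.List.pyGetD row v 0)),
                   PySem.List.pySetD s2.2.1 v sel.1, s2.2.2)
                else s2)
              (s.1, s.2.1, done)) (k, p, m)) := by
  intro l
  induction l with
  | nil => intro p k m; rfl
  | cons x rest ih =>
    intro p k m
    rw [List.foldl_cons]
    simp only [primOutA]
    have hu : findMinKeyA k m V =
        ((PySem.List.pyRange 0 V 1).foldl
          (fun (t : Int × Option Int) v =>
            if ¬ PySem.List.pyGetD m v false ∧ oLt (PySem.List.pyGetD k v none) t.2 then
              (v, PySem.List.pyGetD k v none)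
            else t) (-1, none)).1 := by
      rw [findMinKeyA, fmk_eq_fold]
    rw [hu]
    rw [primUpd_eq_fold]
    rw [ih]

-- ---- properties of Prim's parent array and of B's children buckets ----

theorem fmkGo_mem (key : List (Option Int)) (mst : List Bool) :
    ∀ (l : List Int) (mv : Option Int) (mi : Int),
      (fmkGo key mst l (mv, mi)).2 = mi ∨ (fmkGo key mst l (mv, mi)).2 ∈ l := by
  intro l
  induction l with
  | nil => intro mv mi; left; rfl
  | cons v rest ih =>
    intro mv mi
    rw [fmkGo]
    by_cases hc : ¬ PySem.List.pyGetD mst v false ∧ oLt (PySem.List.pyGetD key v none) mv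
    · rw [if_pos hc]
      rcases ih (PySem.List.pyGetD key v none) v with h | h
      · right; rw [h]; exact List.mem_cons_self
      · right; exact List.mem_cons_of_mem _ h
    · rw [if_neg hc]
      rcases ih mv mi with h | h
      · left; exact h
      · right; exact List.mem_cons_of_mem _ h

theorem primUpdA_inv (graph : List (List Int)) (V : Int) (u : Int)
    (hu : u = -1 ∨ (0 ≤ u ∧ u < V)) :
    ∀ (l : List Int) (p : List Int) (k : List (Option Int)) (m : List Bool),
      p.length = V.toNat → (∀ x ∈ p, x = -1 ∨ (0 ≤ x ∧ x < V)) →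
      (primUpdA graph u l (p, k, m)).1.length = V.toNat ∧
        ∀ x ∈ (primUpdA graph u l (p, k, m)).1, x = -1 ∨ (0 ≤ x ∧ x < V) := by
  intro l
  induction l with
  | nil => intro p k m hl hm; exact ⟨hl, hm⟩
  | cons v rest ih =>
    intro p k m hl hm
    rw [primUpdA]
    by_cases hc : PySem.List.pyGetD (PySem.List.pyGetD graph u []) v 0 ≠ 0 ∧
        ¬ PySem.List.pyGetD m v false ∧
        iLt (PySem.List.pyGetD (PySem.List.pyGetD graph u []) v 0) (PySem.List.pyGetD k v none) = true
    · rw [if_pos hc]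
      refine ih _ _ _ ?_ ?_
      · rw [PySem.List.length_pySetD]; exact hl
      · intro x hx
        rcases pySetD_cases p v u with ⟨kk, hkk⟩ | hid
        · rw [hkk] at hx
          rcases List.mem_or_eq_of_mem_set hx with hx | hx
          · exact hm x hx
          · subst hx; exact hu
        · rw [hid] at hx; exact hm x hx
    · rw [if_neg hc]
      exact ih _ _ _ hl hm

theorem primOutA_inv (graph : List (List Int)) (V : Int) :
    ∀ (l : List Int) (p : List Int) (k : List (Option Int)) (m : List Bool),
      p.length = V.toNat → (∀ x ∈ p, x = -1 ∨ (0 ≤ x ∧ x < V)) →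
      (primOutA graph V l (p, k, m)).1.length = V.toNat ∧
        ∀ x ∈ (primOutA graph V l (p, k, m)).1, x = -1 ∨ (0 ≤ x ∧ x < V) := by
  intro l
  induction l with
  | nil => intro p k m hl hm; exact ⟨hl, hm⟩
  | cons x rest ih =>
    intro p k m hl hm
    simp only [primOutA]
    have hu : findMinKeyA k m V = -1 ∨ (0 ≤ findMinKeyA k m V ∧ findMinKeyA k m V < V) := by
      rcases fmkGo_mem k m (PySem.List.pyRange 0 V 1) none (-1) with h | h
      · left; exact h
      · right; exact PySem.List.mem_pyRange_one.mp h
    obtain ⟨h1, h2⟩ := primUpdA_inv graph V (findMinKeyA k m V) hu (PySem.List.pyRange 0 V 1)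
      p k (PySem.List.pySetD m (findMinKeyA k m V) true) hl hm
    have := ih (primUpdA graph (findMinKeyA k m V) (PySem.List.pyRange 0 V 1)
        (p, k, PySem.List.pySetD m (findMinKeyA k m V) true)).1
      (primUpdA graph (findMinKeyA k m V) (PySem.List.pyRange 0 V 1)
        (p, k, PySem.List.pySetD m (findMinKeyA k m V) true)).2.1
      (primUpdA graph (findMinKeyA k m V) (PySem.List.pyRange 0 V 1)
        (p, k, PySem.List.pySetD m (findMinKeyA k m V) true)).2.2 h1 h2
    simpa using this

theorem prim_parent_prop (graph : List (List Int)) (V : Int) :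
    (primMSTA graph V).length = V.toNat ∧
      ∀ x ∈ primMSTA graph V, x = -1 ∨ (0 ≤ x ∧ x < V) := by
  unfold primMSTA
  refine primOutA_inv graph V _ _ _ _ (List.length_replicate) ?_
  intro x hx
  left
  exact List.eq_of_mem_replicate hx

theorem pyGetD_pySetD_self' {α : Type} (xs : List α) (i : Int) (v d : α) (h0 : 0 ≤ i)
    (hl : i < (xs.length : Int)) : PySem.List.pyGetD (PySem.List.pySetD xs i v) i d = v := by
  rw [PySem.List.pySetD_of_nonneg xs v h0]
  rw [PySem.List.pyGetD_eq_getElem _ d h0 (by simpa using hl)]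
  simp

theorem pyGetD_pySetD_ne {α : Type} (xs : List α) (i j : Int) (v d : α) (h0 : 0 ≤ i) (hj : 0 ≤ j)
    (hl : j < (xs.length : Int)) (hne : i ≠ j) :
    PySem.List.pyGetD (PySem.List.pySetD xs i v) j d = PySem.List.pyGetD xs j d := by
  rw [PySem.List.pySetD_of_nonneg xs v h0]
  rw [PySem.List.pyGetD_eq_getElem _ d hj (by simpa using hl),
      PySem.List.pyGetD_eq_getElem _ d hj (by simpa using hl)]
  rw [List.getElem_set]
  rw [if_neg (by omega)]

theorem kids_build (parent : List Int) (V : Int)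
    (hp : ∀ i : Int, 0 ≤ i → i < V → PySem.List.pyGetD parent i 0 = -1 ∨
      (0 ≤ PySem.List.pyGetD parent i 0 ∧ PySem.List.pyGetD parent i 0 < V)) :
    ∀ (l : List Int) (acc : List (List Int)), acc.length = V.toNat → (∀ i ∈ l, 0 ≤ i ∧ i < V) →
      ∀ c : Int, 0 ≤ c → c < V →
        PySem.List.pyGetD
          (l.foldl (fun ks i =>
            let p := PySem.List.pyGetD parent i 0
            if 0 ≤ p then PySem.List.pySetD ks p (PySem.List.pyGetD ks p [] ++ [i]) else ks) acc) c [] =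
        PySem.List.pyGetD acc c [] ++ l.filter (fun i => PySem.List.pyGetD parent i 0 == c) := by
  intro l
  induction l with
  | nil => intro acc _ _ c _ _; simp
  | cons i rest ih =>
    intro acc hacc hl c hc0 hcV
    obtain ⟨hi0, hiV⟩ := hl i List.mem_cons_self
    rw [List.foldl_cons, List.filter_cons]
    by_cases hpos : (0 : Int) ≤ PySem.List.pyGetD parent i 0
    · have hpV : PySem.List.pyGetD parent i 0 < V := by
        rcases hp i hi0 hiV with h | h
        · omega
        · exact h.2
      simp only [if_pos hpos]
      rw [ih _ (by rw [PySem.List.length_pySetD]; exact hacc)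
        (fun x hx => hl x (List.mem_cons_of_mem _ hx)) c hc0 hcV]
      by_cases hceq : PySem.List.pyGetD parent i 0 = c
      · have hbeq : (PySem.List.pyGetD parent i 0 == c) = true := by simp [hceq]
        rw [hbeq, if_pos rfl]
        subst hceq
        rw [pyGetD_pySetD_self']
        · simp
        · exact hpos
        · omega
      · have hbeq : (PySem.List.pyGetD parent i 0 == c) = false := by simp [hceq]
        rw [hbeq, if_neg (by simp)]
        rw [pyGetD_pySetD_ne]
        · exact hpos
        · exact hc0
        · omega
        · exact hceq
    · simp only [if_neg hpos]
      have hbeq : (PySem.List.pyGetD parent i 0 == c) = false := by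
        simp only [beq_eq_false_iff_ne, ne_eq]
        intro h; rw [h] at hpos; exact hpos hc0
      rw [hbeq, if_neg (by simp)]
      exact ih acc hacc (fun x hx => hl x (List.mem_cons_of_mem _ hx)) c hc0 hcV

theorem kids_spec (parent : List Int) (V : Int)
    (hp : ∀ i : Int, 0 ≤ i → i < V → PySem.List.pyGetD parent i 0 = -1 ∨
      (0 ≤ PySem.List.pyGetD parent i 0 ∧ PySem.List.pyGetD parent i 0 < V)) :
    ∀ c : Int, 0 ≤ c → c < V →
      PySem.List.pyGetD
        ((PySem.List.pyRange 1 V 1).foldl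
          (fun ks i =>
            let p := PySem.List.pyGetD parent i 0
            if 0 ≤ p then PySem.List.pySetD ks p (PySem.List.pyGetD ks p [] ++ [i]) else ks)
          (List.replicate V.toNat ([] : List Int))) c [] = childrenOf parent V c := by
  intro c hc0 hcV
  rw [kids_build parent V hp (PySem.List.pyRange 1 V 1) (List.replicate V.toNat [])
    List.length_replicate
    (fun x hx => by have := PySem.List.mem_pyRange_one.mp hx; omega) c hc0 hcV]
  have : PySem.List.pyGetD (List.replicate V.toNat ([] : List Int)) c [] = [] := by
    rw [PySem.List.pyGetD_eq_getElem _ _ hc0 (by simp; omega)]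
    simp
  rw [this, childrenOf]
  simp

-- ---- the cost loop equals the zipped sum ----

theorem cost_eq_zip (graph : List (List Int)) (path : List Int) :
    ∀ (k : Nat) (c : Int),
      costGoA graph path (PySem.List.pyRange ((k : Int) + 1) (path.length : Int) 1) c =
        ((path.drop k).zip (path.drop (k + 1))).foldl
          (fun c ab => c + PySem.List.pyGetD (PySem.List.pyGetD graph ab.1 []) ab.2 0) c := by
  suffices H : ∀ (n k : Nat) (c : Int), path.length - k = n →
      costGoA graph path (PySem.List.pyRange ((k : Int) + 1) (path.length : Int) 1) c =
        ((path.drop k).zip (path.drop (k + 1))).foldl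
          (fun c ab => c + PySem.List.pyGetD (PySem.List.pyGetD graph ab.1 []) ab.2 0) c by
    intro k c; exact H _ k c rfl
  intro n
  induction n with
  | zero =>
    intro k c hk
    have hlen : path.length ≤ k := by omega
    rw [PySem.List.pyRange_one_eq_nil (by omega)]
    rw [costGoA]
    rw [List.drop_eq_nil_of_le (by omega)]
    simp
  | succ n ihn =>
    intro k c hk
    by_cases hk1 : k + 1 < path.length
    · rw [PySem.List.pyRange_one_cons (by omega)]
      rw [costGoA]
      have he1 : (k : Int) + 1 - 1 = (k : Int) := by ring
      have hg1 : PySem.List.pyGetD path ((k : Int) + 1 - 1) 0 = path[k] := by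
        rw [he1, PySem.List.pyGetD_eq_getElem _ _ (by positivity) (by omega)]
        simp
      have hg2 : PySem.List.pyGetD path ((k : Int) + 1) 0 = path[k + 1] := by
        rw [show ((k : Int) + 1) = ((k + 1 : Nat) : Int) by push_cast; ring]
        rw [PySem.List.pyGetD_eq_getElem _ _ (by positivity) (by omega)]
        simp
      rw [hg1, hg2]
      have hd1 : path.drop k = path[k] :: path.drop (k + 1) :=
        List.drop_eq_getElem_cons (by omega)
      have hd2 : path.drop (k + 1) = path[k + 1] :: path.drop (k + 2) :=
        List.drop_eq_getElem_cons (by omega)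
      rw [hd1, hd2, List.zip_cons_cons, List.foldl_cons, ← hd2]
      have := ihn (k + 1) (c + PySem.List.pyGetD (PySem.List.pyGetD graph path[k] []) path[k + 1] 0)
        (by omega)
      rw [show ((k : Int) + 1 + 1) = ((k + 1 : Nat) : Int) + 1 by push_cast; ring]
      exact this
    · rw [PySem.List.pyRange_one_eq_nil (by omega)]
      rw [costGoA]
      rw [List.drop_eq_nil_of_le (show path.length ≤ k + 1 by omega)]
      simp

theorem fcount_replicate (n : Nat) : fcount (List.replicate n false) = n := by
  induction n with
  | zero => rfl
  | succ n ih => simp [fcount, List.replicate_succ] at *; omega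

-- ===== VERDICT (by name: the statement is the Claim_ definition above) =====
theorem tspApproximation_spec : Claim_equal_tspApproximation := by
  unfold Claim_equal_tspApproximation
  intro graph V _ hpre
  obtain ⟨hV1, hVg, hrows, hlast⟩ := hpre
  unfold Spec_tspApproximation
  have hVn : (V.toNat : Int) = V := by omega
  simp only [tspApproximation, tspApproximation_alt]
  -- Prim's parent array: B's fold equals A's recursion
  rw [primMSTA, primOut_eq_fold]
  set BF := (PySem.List.pyRange 0 (V - 1) 1).foldl
      (fun (s : List (Option Int) × List Int × List Bool) _ =>
        let sel :=
          (PySem.List.pyRange 0 V 1).foldl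
            (fun (t : Int × Option Int) v =>
              if ¬ PySem.List.pyGetD s.2.2 v false ∧ oLt (PySem.List.pyGetD s.1 v none) t.2 then
                (v, PySem.List.pyGetD s.1 v none)
              else t)
            (-1, none)
        let done := PySem.List.pySetD s.2.2 sel.1 true
        let row := PySem.List.pyGetD graph sel.1 []
        (PySem.List.pyRange 0 V 1).foldl
          (fun (s2 : List (Option Int) × List Int × List Bool) v =>
            if PySem.List.pyGetD row v 0 ≠ 0 ∧ ¬ PySem.List.pyGetD s2.2.2 v false ∧
                iLt (PySem.List.pyGetD row v 0) (PySem.List.pyGetD s2.1 v none) = true then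
              (PySem.List.pySetD s2.1 v (some (PySem.List.pyGetD row v 0)),
               PySem.List.pySetD s2.2.1 v sel.1, s2.2.2)
            else s2)
          (s.1, s.2.1, done))
      (PySem.List.pySetD (List.replicate V.toNat (none : Option Int)) 0 (some 0),
       List.replicate V.toNat (-1), List.replicate V.toNat false) with hBF
  set P := BF.2.1 with hPdef
  -- properties of the parent array
  have hP : P.length = V.toNat ∧ ∀ x ∈ P, x = -1 ∨ (0 ≤ x ∧ x < V) := by
    have := prim_parent_prop graph V
    rw [primMSTA, primOut_eq_fold, ← hBF] at this
    exact this
  have hp' : ∀ i : Int, 0 ≤ i → i < V → PySem.List.pyGetD P i 0 = -1 ∨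
      (0 ≤ PySem.List.pyGetD P i 0 ∧ PySem.List.pyGetD P i 0 < V) := by
    intro i h0 hiV
    have hm : PySem.List.pyGetD P i 0 ∈ P := by
      rw [PySem.List.pyGetD_eq_getElem _ _ h0 (by rw [hP.1]; omega)]
      exact List.getElem_mem _
    exact hP.2 _ hm
  -- B's children buckets are childrenOf
  have hk : ∀ c : Int, 0 ≤ c → c < V →
      PySem.List.pyGetD
        ((PySem.List.pyRange 1 V 1).foldl
          (fun ks i =>
            let p := PySem.List.pyGetD P i 0
            if 0 ≤ p then PySem.List.pySetD ks p (PySem.List.pyGetD ks p [] ++ [i]) else ks)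
          (List.replicate V.toNat ([] : List Int))) c [] = childrenOf P V c :=
    kids_spec P V hp'
  set KB := (PySem.List.pyRange 1 V 1).foldl
      (fun ks i =>
        let p := PySem.List.pyGetD P i 0
        if 0 ≤ p then PySem.List.pySetD ks p (PySem.List.pyGetD ks p [] ++ [i]) else ks)
      (List.replicate V.toNat ([] : List Int)) with hKB
  set vis0 := List.replicate V.toNat false with hvis0
  have hfc0 : fcount vis0 = V.toNat := fcount_replicate V.toNat
  have hlen0 : (V : Int) = (vis0.length : Int) := by rw [hvis0, List.length_replicate]; omega
  -- B's stack loop with its big fuel equals the canonically fuelled loop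
  have hbig : dfsB KB ((V.toNat + 1) * (V.toNat + 2)) [0] vis0 [] = dfsC KB [0] vis0 [] := by
    rw [dfsC]
    refine dfsB_irrel P V KB hk _ _ _ _ _ hlen0 ?_ ?_ ?_
    · intro c hc; simp at hc; subst hc; omega
    · rw [hvis0, List.length_replicate, ← hvis0, hfc0]
      have : (V.toNat + 1) * (V.toNat + 2) = (V.toNat + 1) * V.toNat + 2 * V.toNat + 2 := by ring
      simp only [List.length_cons, List.length_nil]
      omega
    · omega
  -- run the canonical loop against the spec
  have hrun : dfsC KB [0] vis0 [] =
      ((specN P V (V.toNat + 1) 0 vis0).1, (specN P V (V.toNat + 1) 0 vis0).2) := by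
    have := dfsC_spec P V KB hk (fcount vis0) vis0 [0] [] [] rfl hlen0
      (by intro c hc; simp at hc; subst hc; omega) (by intro c hc; simp at hc)
    simp only [List.append_nil, List.nil_append] at this
    rw [this, dfsC_nil]
    rw [specGo, specGo]
    simp [hfc0]
  -- A's recursive traversal against the same spec
  have hA : fptA P V (V.toNat + 1) 0 vis0 [] =
      ((specN P V (V.toNat + 1) 0 vis0).1, [] ++ (specN P V (V.toNat + 1) 0 vis0).2) := by
    refine fptA_spec P V (V.toNat + 1) 0 vis0 [] (by omega) le_rfl hV1 ?_ (Or.inl rfl)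
    rw [PySem.List.pyGetD_eq_getElem _ _ le_rfl (by rw [hvis0, List.length_replicate]; omega)]
    simp [hvis0]
  rw [hbig, hrun, hA]
  -- the two cost loops agree on the common path
  have hcost := cost_eq_zip graph ((specN P V (V.toNat + 1) 0 vis0).2 ++ [0]) 0 0
  simp only [Nat.cast_zero, zero_add, List.drop_zero] at hcost
  simp only [List.nil_append]
  rw [hcost]
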